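-- pv_equiv track=rewrite | github.com/do0ori/Algorithm-Study | LIG넥스원/2026 상반기/2번/참가할_대회_고르기.py | solution
-- ===== SOURCE A (Python) =====
-- def solution(contests, k: int, p: int):
--     ranked = []
--
--     for idx, contest in enumerate(contests):
--         solvable = sum(1 for difficulty in contest if difficulty <= p)
--         ranked.append((-solvable, idx))
--
--     ranked.sort()
--     selected = sorted(idx for _, idx in ranked[:k])
--     return selected
-- ===== SOURCE B (Python) =====
-- def solution(contests, k: int, p: int):
--     # Counting-sort selection: bucket contest indices by solvable count,
--     # walk buckets from the highest count down, then keep the first k.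
--     counts = [sum(1 for d in c if d <= p) for c in contests]
--     top = max(counts, default=-1)
--     buckets = [[] for _ in range(top + 1)]
--     for i, c in enumerate(counts):
--         buckets[c].append(i)
--     order = []
--     for bucket in reversed(buckets):
--         order.extend(bucket)
--     return sorted(order[:k])
-- ===== Notes on version B (the rewrite author's own statement) =====
-- stated objective: alternative
-- what changed: Replaces A's comparison sort of (-solvable, idx) tuples by a counting sort: contest indices are bucketed by solvable count and the buckets are concatenated from the highest count down before slicing off the first k.
import Mathlib
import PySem

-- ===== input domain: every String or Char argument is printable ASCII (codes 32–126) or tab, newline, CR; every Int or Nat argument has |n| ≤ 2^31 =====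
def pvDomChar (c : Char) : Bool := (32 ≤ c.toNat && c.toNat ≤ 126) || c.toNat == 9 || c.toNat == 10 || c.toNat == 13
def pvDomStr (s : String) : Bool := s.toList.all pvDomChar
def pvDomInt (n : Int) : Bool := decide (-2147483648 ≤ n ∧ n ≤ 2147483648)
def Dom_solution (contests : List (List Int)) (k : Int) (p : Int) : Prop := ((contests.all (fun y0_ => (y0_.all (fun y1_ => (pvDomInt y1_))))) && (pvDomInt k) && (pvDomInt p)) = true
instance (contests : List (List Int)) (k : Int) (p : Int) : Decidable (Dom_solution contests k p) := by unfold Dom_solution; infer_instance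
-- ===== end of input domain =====

-- B replaces A's comparison sort of (-solvable, idx) tuples by a counting sort: contest
-- indices are bucketed by solvable count and the buckets are walked from the top count down
-- (alternative decomposition).

-- ===== PORT A =====
def solution (contests : List (List Int)) (k : Int) (p : Int) : List Int :=
  let ranked := (PySem.List.enumerate contests).foldl
    (fun acc ic =>
      let solvable := ((ic.2.filter (fun d => d ≤ p)).map (fun _ => (1 : Int))).sum
      acc ++ [(-solvable, ic.1)]) []
  let ranked := PySem.List.sorted2 ranked (fun t => t.1) (fun t => t.2)
  PySem.List.sorted ((PySem.List.slice ranked none (some k)).map (fun t => t.2)) (fun x => x)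

-- ===== PORT B =====
-- buckets[c].append(i) is ported as a functional update of the bucket list at index c
-- (pyGetD/pySetD; c = a solvable count is always a valid index, so this is exact).
def solution_alt (contests : List (List Int)) (k : Int) (p : Int) : List Int :=
  let counts := contests.map (fun c => ((c.filter (fun d => d ≤ p)).map (fun _ => (1 : Int))).sum)
  let top := PySem.List.maxD counts (fun x => x) (-1)
  let buckets := (PySem.List.pyRange 0 (top + 1)).map (fun _ => ([] : List Int))
  let buckets := (PySem.List.enumerate counts).foldl
    (fun b ic => PySem.List.pySetD b ic.2 (PySem.List.pyGetD b ic.2 [] ++ [ic.1])) buckets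
  let order := buckets.reverse.foldl (fun acc bucket => acc ++ bucket) []
  PySem.List.sorted (PySem.List.slice order none (some k)) (fun x => x)

-- ===== PRECONDITION & SPEC =====
def Spec_solution (contests : List (List Int)) (k : Int) (p : Int) (out : List Int) : Prop := out = solution_alt contests k p
instance (contests : List (List Int)) (k : Int) (p : Int) (out : List Int) : Decidable (Spec_solution contests k p out) := by unfold Spec_solution; infer_instance

-- ===== CLAIM (what is proved, stated in full; the proofs are below) =====
def Claim_equal_solution : Prop := ∀ (contests : List (List Int)) (k : Int) (p : Int), Dom_solution contests k p → Spec_solution contests k p (solution contests k p)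

-- ===== LEMMAS AND PROOFS =====

-- the strict "better contest" order A sorts by: lex on (-solvable, index); exactly sorted2's comparison
def blex (a b : Int × Int) : Bool := decide (a.1 < b.1) || (!decide (b.1 < a.1) && decide (a.2 < b.2))

-- number of problems in contest c solvable at skill p
def cnt (p : Int) (c : List Int) : Int := ((c.filter (fun d => d ≤ p)).length : Int)

-- index j paired with A's sort key for contest j
def gkey (p : Int) (contests : List (List Int)) (j : Int) : Int × Int :=
  (-(cnt p (PySem.List.pyGetD contests j [])), j)

theorem blex_asymm {a b : Int × Int} (h : blex a b = true) : blex b a = false := by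
  simp [blex] at h ⊢; omega

theorem blex_total {a b : Int × Int} (h1 : blex a b = false) (h2 : blex b a = false) : a = b := by
  simp [blex] at h1 h2
  obtain ⟨a1, a2⟩ := a; obtain ⟨b1, b2⟩ := b
  simp only [Prod.mk.injEq]
  constructor <;> omega

theorem insertBy_blex_pairwise (x : Int × Int) (ys : List (Int × Int))
    (h : ys.Pairwise (fun a b => blex b a = false)) :
    (PySem.List.insertBy blex x ys).Pairwise (fun a b => blex b a = false) := by
  induction ys with
  | nil => simp [PySem.List.insertBy.eq_1]
  | cons y ys ih =>
    rw [PySem.List.insertBy.eq_2]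
    rcases List.pairwise_cons.mp h with ⟨hy, hys⟩
    by_cases hxy : blex x y = true
    · simp only [hxy, if_true]
      refine List.pairwise_cons.mpr ⟨?_, List.pairwise_cons.mpr ⟨hy, hys⟩⟩
      intro z hz
      rcases List.mem_cons.mp hz with rfl | hz'
      · exact blex_asymm hxy
      · by_cases hzx : blex z x = true
        · have h1 : blex z y = true := by
            simp [blex] at hzx hxy ⊢; omega
          have := hy z hz'
          simp_all
        · simpa using hzx
    · simp only [hxy, Bool.false_eq_true, if_false]
      refine List.pairwise_cons.mpr ⟨?_, ih hys⟩
      intro z hz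
      rcases (PySem.List.mem_insertBy blex x z ys).mp hz with rfl | hz'
      · simpa using hxy
      · exact hy z hz'

theorem foldl_insertBy_blex_pairwise (xs acc : List (Int × Int))
    (h : acc.Pairwise (fun a b => blex b a = false)) :
    (xs.foldl (fun acc x => PySem.List.insertBy blex x acc) acc).Pairwise (fun a b => blex b a = false) := by
  induction xs generalizing acc with
  | nil => simpa using h
  | cons x xs ih => exact ih _ (insertBy_blex_pairwise x acc h)

theorem sorted2_eq_foldl (xs : List (Int × Int)) :
    PySem.List.sorted2 xs (fun t => t.1) (fun t => t.2)
      = xs.foldl (fun acc x => PySem.List.insertBy blex x acc) [] := by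
  rfl

theorem ranked_eq (contests : List (List Int)) (p : Int) :
    (PySem.List.enumerate contests).foldl
      (fun acc ic =>
        let solvable := ((ic.2.filter (fun d => d ≤ p)).map (fun _ => (1 : Int))).sum
        acc ++ [(-solvable, ic.1)]) []
      = (PySem.List.pyRange 0 ((contests.length : Int))).map (gkey p contests) := by
  rw [PySem.List.foldl_append_singleton_eq_map
        (f := fun ic : Int × List Int => (-(((ic.2.filter (fun d => d ≤ p)).map (fun _ => (1 : Int))).sum), ic.1)),
      PySem.List.enumerate_eq_map_pyRange contests ([] : List Int), List.map_map]
  simp [Function.comp, gkey, cnt]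

theorem slice_to_take {A : Type} (xs : List A) (k : Int) :
    PySem.List.slice xs none (some k)
      = xs.take (if 0 ≤ k then k.toNat else xs.length - (-k).toNat) := by
  by_cases hk : 0 ≤ k
  · rw [if_pos hk, show k = ((k.toNat : Nat) : Int) from by omega, PySem.List.slice_to_natCast]
    simp
    omega
  · rw [if_neg hk, show k = -(((-k).toNat : Nat) : Int) from by omega,
      PySem.List.slice_to_neg_natCast xs _ (by omega)]
    simp
    omega

-- a generator-sum of 1's is a count
theorem sum_ones_eq_cnt (p : Int) (c : List Int) :
    ((c.filter (fun d => d ≤ p)).map (fun _ => (1 : Int))).sum = cnt p c := by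
  simp [cnt, List.map_const']

-- the bucket-filling loop, pointwise: entry c collects (in order) the first components of
-- the processed pairs whose second component is c
theorem bucket_fold (l : List (Int × Int)) (B : List (List Int))
    (hl : ∀ pr ∈ l, 0 ≤ pr.2 ∧ pr.2 < (B.length : Int)) :
    (l.foldl (fun b ic => PySem.List.pySetD b ic.2 (PySem.List.pyGetD b ic.2 [] ++ [ic.1])) B).length = B.length
    ∧ ∀ c : Nat, c < B.length →
        (l.foldl (fun b ic => PySem.List.pySetD b ic.2 (PySem.List.pyGetD b ic.2 [] ++ [ic.1])) B).getD c []
          = B.getD c [] ++ (l.filter (fun pr => pr.2 = (c : Int))).map (fun pr => pr.1) := by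
  induction l generalizing B with
  | nil => simp
  | cons pr l ih =>
    obtain ⟨h0, hlt⟩ := hl pr (by simp)
    have hBn : pr.2.toNat < B.length := by omega
    have hB' : PySem.List.pySetD B pr.2 (PySem.List.pyGetD B pr.2 [] ++ [pr.1])
        = B.set pr.2.toNat (B[pr.2.toNat] ++ [pr.1]) := by
      rw [PySem.List.pySetD_of_nonneg _ _ h0,
        PySem.List.pyGetD_eq_getElem _ _ h0 (by omega)]
    simp only [List.foldl_cons, hB']
    set B' := B.set pr.2.toNat (B[pr.2.toNat] ++ [pr.1]) with hB'def
    have hlen' : B'.length = B.length := by simp [hB'def]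
    obtain ⟨ihlen, ihget⟩ := ih B' (by
      intro q hq; have := hl q (by simp [hq]); omega)
    refine ⟨by rw [ihlen, hlen'], ?_⟩
    intro c hc
    have hc' : c < B'.length := by omega
    rw [ihget c hc', List.filter_cons]
    rw [List.getD_eq_getElem _ _ hc', List.getD_eq_getElem _ _ hc]
    by_cases hceq : pr.2 = (c : Int)
    · have hcn : pr.2.toNat = c := by omega
      have : B'[c]'hc' = B[c] ++ [pr.1] := by
        simp [hB'def, hcn, List.getElem_set_self]
      simp [this, hceq]
    · have hne : pr.2.toNat ≠ c := by omega
      have : B'[c]'hc' = B[c] := by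
        simp [hB'def, List.getElem_set_ne hne]
      simp [this, hceq]

-- filter/fst through the enumerate map
theorem filter_enum_map (n : Int) (cf : Int → Int) (c : Int) :
    (((PySem.List.pyRange 0 n).map (fun j => (j, cf j))).filter (fun pr => pr.2 = c)).map (fun pr => pr.1)
      = (PySem.List.pyRange 0 n).filter (fun j => cf j = c) := by
  rw [List.filter_map, List.map_map]
  simp only [Function.comp_def]
  rw [List.map_id']

-- count of contest i as B reads it
def cntf (p : Int) (contests : List (List Int)) (i : Int) : Int :=
  cnt p (PySem.List.pyGetD contests i [])

-- B's bucket of count c: the indices with that solvable count, ascending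
def bucketL (p : Int) (contests : List (List Int)) (c : Nat) : List Int :=
  (PySem.List.pyRange 0 (contests.length : Int)).filter (fun i => cntf p contests i = (c : Int))

-- B's top = max(counts, default=-1)
def topOf (p : Int) (contests : List (List Int)) : Int :=
  PySem.List.maxD (contests.map (cnt p)) (fun x => x) (-1)

theorem cnt_nonneg (p : Int) (c : List Int) : 0 ≤ cnt p c := by
  simp [cnt]

theorem top_ge (p : Int) (contests : List (List Int)) :
    ∀ x ∈ contests.map (cnt p), x ≤ topOf p contests := by
  intro x hx
  unfold topOf PySem.List.maxD
  cases h : PySem.List.max? (contests.map (cnt p)) (fun x => x) with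
  | none =>
    rw [PySem.List.max?_eq_none_iff] at h
    simp [h] at hx
  | some m => simpa using PySem.List.max?_isMax h x hx

theorem top_ge_neg_one (p : Int) (contests : List (List Int)) : -1 ≤ topOf p contests := by
  unfold topOf PySem.List.maxD
  cases h : PySem.List.max? (contests.map (cnt p)) (fun x => x) with
  | none => simp
  | some m =>
    have hm := PySem.List.max?_mem h
    rcases List.mem_map.mp hm with ⟨c, _, rfl⟩
    have := cnt_nonneg p c
    simp
    omega

-- B reads counts[i] through pyGetD; it is cntf for every index
theorem cf_eq (p : Int) (contests : List (List Int)) (i : Int) :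
    PySem.List.pyGetD (contests.map (cnt p)) i 0 = cntf p contests i := by
  have h := PySem.List.pyGetD_map (cnt p) contests i []
  have hz : cnt p [] = 0 := by simp [cnt]
  rw [hz] at h
  rw [h, cntf]

theorem cntf_bounds (p : Int) (contests : List (List Int)) (i : Int)
    (hi : i ∈ PySem.List.pyRange 0 (contests.length : Int)) :
    0 ≤ cntf p contests i ∧ cntf p contests i ≤ topOf p contests := by
  have hi' := PySem.List.mem_pyRange_one.mp hi
  have hmem : cntf p contests i ∈ contests.map (cnt p) := by
    rw [← cf_eq]
    have := PySem.List.pyGetD_mem (contests.map (cnt p)) (i := i) 0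
      (by simp [PySem.Raise.InRange]; omega)
    exact this
  refine ⟨?_, top_ge p contests _ hmem⟩
  rcases List.mem_map.mp hmem with ⟨c, _, hc⟩
  rw [← hc]; exact cnt_nonneg p c

-- B in closed form: the buckets are walked from the top count down and flattened
theorem alt_closed (contests : List (List Int)) (k p : Int) :
    solution_alt contests k p
      = PySem.List.sorted
          (PySem.List.slice
            (((List.range ((topOf p contests + 1).toNat)).reverse.map (bucketL p contests)).flatten)
            none (some k)) (fun x => x) := by
  unfold solution_alt
  simp only [sum_ones_eq_cnt]
  rw [show (fun c : List Int => cnt p c) = cnt p from rfl,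
    PySem.List.enumerate_eq_map_pyRange (contests.map (cnt p)) 0,
    show PySem.List.maxD (contests.map (cnt p)) (fun x => x) (-1) = topOf p contests from rfl]
  set n : Int := (contests.length : Int) with hn
  set top : Int := topOf p contests with htop
  set L : Nat := (top + 1).toNat with hL
  have htopm1 : -1 ≤ top := top_ge_neg_one p contests
  have hlenmap : PySem.List.len (contests.map (cnt p)) = n := by
    simp [PySem.List.len_eq, hn]
  rw [hlenmap]
  set B0 : List (List Int) := (PySem.List.pyRange 0 (top + 1)).map (fun _ => ([] : List Int)) with hB0
  set l : List (Int × Int) :=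
    (PySem.List.pyRange 0 n).map (fun j => (j, PySem.List.pyGetD (contests.map (cnt p)) j 0)) with hl
  have hB0len : B0.length = L := by
    simp [hB0, PySem.List.length_pyRange_one, hL]
  have hbounds : ∀ pr ∈ l, 0 ≤ pr.2 ∧ pr.2 < (B0.length : Int) := by
    intro pr hpr
    rcases List.mem_map.mp hpr with ⟨j, hj, rfl⟩
    have h1 := cntf_bounds p contests j hj
    rw [cf_eq]
    have : (B0.length : Int) = top + 1 := by rw [hB0len, hL]; omega
    rw [this]
    omega
  obtain ⟨hflen, hfget⟩ := bucket_fold l B0 hbounds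
  have hbuckets :
      l.foldl (fun b ic => PySem.List.pySetD b ic.2 (PySem.List.pyGetD b ic.2 [] ++ [ic.1])) B0
        = (List.range L).map (bucketL p contests) := by
    apply List.ext_getElem
    · rw [hflen, hB0len]; simp
    · intro c h1 h2
      have hcL : c < L := by simpa using h2
      have hcB : c < B0.length := by omega
      rw [← List.getD_eq_getElem _ ([] : List Int) h1, hfget c hcB]
      have hB0c : B0.getD c [] = [] := by
        rw [List.getD_eq_getElem _ _ hcB]
        simp [hB0]
      rw [hB0c, List.nil_append, hl, filter_enum_map]
      have : ((PySem.List.pyRange 0 n).filter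
              (fun j => PySem.List.pyGetD (contests.map (cnt p)) j 0 = (c : Int)))
            = bucketL p contests c := by
        unfold bucketL
        rw [← hn]
        apply List.filter_congr
        intro x _
        rw [cf_eq]
      rw [this]
      simp
  rw [hbuckets, ← List.map_reverse, PySem.List.foldl_append_eq_flatten, List.nil_append]

theorem solution_eq_alt (contests : List (List Int)) (k p : Int) :
    solution contests k p = solution_alt contests k p := by
  unfold solution
  rw [ranked_eq contests p, alt_closed contests k p]
  show PySem.List.sorted ((PySem.List.slice
      (PySem.List.sorted2 ((PySem.List.pyRange 0 ((contests.length : Int))).map (gkey p contests))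
        (fun t => t.1) (fun t => t.2)) none (some k)).map (fun t => t.2)) (fun x => x) = _
  set n : Int := (contests.length : Int) with hn
  set g : Int → Int × Int := gkey p contests with hgdef
  set ranked : List (Int × Int) := (PySem.List.pyRange 0 n).map g with hranked
  set S : List (Int × Int) := PySem.List.sorted2 ranked (fun t => t.1) (fun t => t.2) with hS
  set top : Int := topOf p contests with htop
  set L : Nat := (top + 1).toNat with hL
  set order : List Int :=
    ((List.range L).reverse.map (bucketL p contests)).flatten with horder
  -- A-side structure: S is a strictly blex-sorted permutation of ranked
  have hperm : S.Perm ranked := by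
    rw [hS, sorted2_eq_foldl]
    simpa using PySem.List.foldl_insertBy_perm blex ranked []
  have hpwR : S.Pairwise (fun a b => blex b a = false) := by
    rw [hS, sorted2_eq_foldl]
    exact foldl_insertBy_blex_pairwise ranked [] (by simp)
  have hsndg : ∀ j, (g j).2 = j := fun j => rfl
  have hmapsnd : (S.map (fun t : Int × Int => t.2)).Perm (PySem.List.pyRange 0 n) := by
    have := hperm.map (fun t : Int × Int => t.2)
    rwa [hranked, List.map_map, show ((fun t : Int × Int => t.2) ∘ g) = id from funext hsndg,
      List.map_id] at this
  have hndsnd : (S.map (fun t : Int × Int => t.2)).Nodup :=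
    hmapsnd.nodup_iff.mpr (PySem.List.nodup_pyRange_one 0 n)
  have hndS : S.Nodup := List.Nodup.of_map _ hndsnd
  have hstrict : S.Pairwise (fun a b => blex a b = true) := by
    refine (hpwR.and hndS).imp ?_
    rintro a b ⟨h1, h2⟩
    cases hab : blex a b with
    | true => rfl
    | false => exact absurd (blex_total hab h1) h2
  have hmemS : ∀ x : Int × Int, x ∈ S ↔ (x.2 ∈ PySem.List.pyRange 0 n ∧ x = g x.2) := by
    intro x
    rw [hperm.mem_iff, hranked, List.mem_map]
    constructor
    · rintro ⟨j, hj, rfl⟩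
      exact ⟨by simpa [hsndg] using hj, by rw [hsndg]⟩
    · rintro ⟨hj, hx⟩
      exact ⟨x.2, hj, hx.symm⟩
  -- keys in terms of counts
  have hgkey : ∀ j : Int, g j = (-(cntf p contests j), j) := fun j => rfl
  -- B-side structure: membership, nodup and blex-sortedness of order
  have hmemb : ∀ (i : Int) (c : Nat),
      i ∈ bucketL p contests c ↔ (i ∈ PySem.List.pyRange 0 n ∧ cntf p contests i = (c : Int)) := by
    intro i c
    unfold bucketL
    rw [← hn, List.mem_filter]
    simp
  have horder_mem : ∀ i : Int, i ∈ order ↔ i ∈ PySem.List.pyRange 0 n := by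
    intro i
    rw [horder, List.mem_flatten]
    constructor
    · rintro ⟨lb, hlb, hi⟩
      rcases List.mem_map.mp hlb with ⟨c, _, rfl⟩
      exact ((hmemb i c).mp hi).1
    · intro hi
      obtain ⟨h0, h1⟩ := cntf_bounds p contests i hi
      refine ⟨bucketL p contests (cntf p contests i).toNat, ?_, ?_⟩
      · apply List.mem_map_of_mem
        rw [List.mem_reverse, List.mem_range, hL]
        omega
      · rw [hmemb]
        exact ⟨hi, by omega⟩
  have horder_nd : order.Nodup := by
    rw [horder, List.nodup_flatten]
    constructor
    · intro lb hlb
      rcases List.mem_map.mp hlb with ⟨c, _, rfl⟩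
      exact List.Nodup.filter _ (PySem.List.nodup_pyRange_one 0 n)
    · rw [List.pairwise_map, List.pairwise_reverse]
      refine List.pairwise_lt_range.imp_of_mem ?_
      intro c1 c2 _ _ hlt
      rw [List.disjoint_left]
      intro x hx2 hx1
      have h2 := ((hmemb x c2).mp hx2).2
      have h1 := ((hmemb x c1).mp hx1).2
      omega
  have horder_pw : order.Pairwise (fun i j => blex (g i) (g j) = true) := by
    rw [horder, List.pairwise_flatten]
    constructor
    · intro lb hlb
      rcases List.mem_map.mp hlb with ⟨c, _, rfl⟩
      have hpwlt : (bucketL p contests c).Pairwise (fun a b : Int => a < b) := by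
        unfold bucketL
        exact List.Pairwise.filter _ (PySem.List.pairwise_lt_pyRange_one 0 _)
      refine hpwlt.imp_of_mem ?_
      intro a b ha hb hab
      have hca := ((hmemb a c).mp ha).2
      have hcb := ((hmemb b c).mp hb).2
      rw [hgkey a, hgkey b]
      simp [blex, hca, hcb]
      omega
    · rw [List.pairwise_map, List.pairwise_reverse]
      refine List.pairwise_lt_range.imp_of_mem ?_
      intro c1 c2 _ _ hlt x hx2 y hy1
      have h2 := ((hmemb x c2).mp hx2).2
      have h1 := ((hmemb y c1).mp hy1).2
      rw [hgkey x, hgkey y]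
      simp [blex, h1, h2]
      omega
  have hmap_pw : (S.map (fun t : Int × Int => t.2)).Pairwise (fun i j => blex (g i) (g j) = true) := by
    rw [List.pairwise_map]
    refine hstrict.imp_of_mem ?_
    intro a b ha hb hab
    have hga := ((hmemS a).mp ha).2
    have hgb := ((hmemS b).mp hb).2
    rw [← hga, ← hgb]
    exact hab
  have hperm2 : (S.map (fun t : Int × Int => t.2)).Perm order := by
    refine hmapsnd.trans ?_
    rw [List.perm_ext_iff_of_nodup (PySem.List.nodup_pyRange_one 0 n) horder_nd]
    intro a
    exact (horder_mem a).symm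
  have heq : S.map (fun t : Int × Int => t.2) = order := by
    refine List.Perm.eq_of_pairwise ?_ hmap_pw horder_pw hperm2
    intro a b _ _ h1 h2
    exact absurd (blex_asymm h1) (by simp [h2])
  have hlen_ord : order.length = S.length := by
    rw [← heq, List.length_map]
  rw [slice_to_take S k, List.map_take, heq, slice_to_take order k, hlen_ord]

-- ===== VERDICT (by name: the statement is the Claim_ definition above) =====
theorem solution_spec : Claim_equal_solution := by
  intro contests k p _
  exact solution_eq_alt contests k p
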